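-- pv_equiv track=rewrite | github.com/momerIkram/EP-ROSCA-BusineeCase | rosco_forecast_app_ultimate (1).py | determine_returning_users_tam
-- ===== SOURCE A (Python) =====
-- def determine_returning_users_tam(month, user_history, durations, rest_periods):
--     """Determine returning users for current month (TAM system)"""
--     returning_users = 0
--
--     for join_month, user_data in user_history.items():
--         for duration, user_count in user_data.items():
--             rest_period = rest_periods.get(duration, 1)
--             return_month = join_month + duration + rest_period
--
--             if return_month == month:
--                 returning_users += user_count
--
--     return returning_users
-- ===== SOURCE B (Python) =====
-- def determine_returning_users_tam(month, user_history, durations, rest_periods):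
--     """Determine returning users for current month (TAM system).
--
--     Instead of scanning every (join_month, duration) entry and testing whether it
--     returns this month, collect the set of durations present, back-compute for each
--     the unique qualifying join month, and read the user count off by dict lookup.
--     """
--     present = set()
--     for user_data in user_history.values():
--         present.update(user_data)
--     total = 0
--     for d in present:
--         join_month = month - d - rest_periods.get(d, 1)
--         total += user_history.get(join_month, {}).get(d, 0)
--     return total
-- ===== Notes on version B (the rewrite author's own statement) =====
-- stated objective: alternative
-- what changed: Replaces the forward scan that tests every (join_month, duration) entry with direct dict lookups: for each duration actually present, the unique qualifying join month is back-computed and its user count read off by index; Pre_ only excludes association lists with duplicate keys, which never arise from real Python dicts.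
import Mathlib
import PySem

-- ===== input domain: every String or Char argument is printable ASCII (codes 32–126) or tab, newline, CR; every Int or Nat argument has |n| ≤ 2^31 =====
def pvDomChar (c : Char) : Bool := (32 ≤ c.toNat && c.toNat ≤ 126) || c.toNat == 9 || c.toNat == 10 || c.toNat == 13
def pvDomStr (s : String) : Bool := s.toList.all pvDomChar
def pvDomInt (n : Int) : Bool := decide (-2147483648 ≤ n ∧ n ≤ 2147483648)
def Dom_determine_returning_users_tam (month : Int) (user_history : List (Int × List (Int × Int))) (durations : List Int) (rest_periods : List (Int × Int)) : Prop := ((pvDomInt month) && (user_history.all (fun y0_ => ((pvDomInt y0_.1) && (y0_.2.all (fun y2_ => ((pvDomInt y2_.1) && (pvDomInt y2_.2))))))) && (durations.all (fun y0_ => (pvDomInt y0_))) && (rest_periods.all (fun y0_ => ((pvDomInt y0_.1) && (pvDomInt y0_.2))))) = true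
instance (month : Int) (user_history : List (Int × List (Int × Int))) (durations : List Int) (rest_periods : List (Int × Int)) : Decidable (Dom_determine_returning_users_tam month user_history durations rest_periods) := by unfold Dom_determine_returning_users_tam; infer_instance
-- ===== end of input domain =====

-- B replaces A's forward scan over every (join_month, duration) entry with direct dict
-- lookups at the back-computed join month for each duration present (alternative, same cost).

-- ===== PORT A =====
def determine_returning_users_tam (month : Int) (user_history : List (Int × List (Int × Int))) (durations : List Int) (rest_periods : List (Int × Int)) : Int :=
  user_history.foldl (fun returning_users p =>
    p.2.foldl (fun returning_users q =>
      let rest_period := (PySem.Dict.mk rest_periods).getD q.1 1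
      let return_month := p.1 + q.1 + rest_period
      if return_month = month then returning_users + q.2 else returning_users)
      returning_users) 0

-- ===== PORT B =====
def determine_returning_users_tam_alt (month : Int) (user_history : List (Int × List (Int × Int))) (durations : List Int) (rest_periods : List (Int × Int)) : Int :=
  let present : PySem.Set Int :=
    user_history.foldl (fun s p => PySem.Set.update s (PySem.Dict.mk p.2).keys) PySem.Set.empty
  present.foldl (fun total d =>
    let join_month := month - d - (PySem.Dict.mk rest_periods).getD d 1
    total + (PySem.Dict.mk ((PySem.Dict.mk user_history).getD join_month [])).getD d 0) 0

-- ===== PRECONDITION & SPEC =====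
-- Pre_ excludes association lists with duplicate keys (in user_history or its inner
-- dicts): those do not represent Python dicts, and on them A's full scan counts every
-- duplicate while B's first-match lookup cannot.
def Pre_determine_returning_users_tam (month : Int) (user_history : List (Int × List (Int × Int))) (durations : List Int) (rest_periods : List (Int × Int)) : Prop :=
  (user_history.map Prod.fst).Nodup ∧ ∀ p ∈ user_history, (p.2.map Prod.fst).Nodup
instance (month : Int) (user_history : List (Int × List (Int × Int))) (durations : List Int) (rest_periods : List (Int × Int)) : Decidable (Pre_determine_returning_users_tam month user_history durations rest_periods) := by unfold Pre_determine_returning_users_tam; infer_instance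

def pvWitness_determine_returning_users_tam : Int × (List (Int × List (Int × Int))) × List Int × (List (Int × Int)) :=
  (10, [(5, [(2, 3)])], [2], [(2, 3)])

def Spec_determine_returning_users_tam (month : Int) (user_history : List (Int × List (Int × Int))) (durations : List Int) (rest_periods : List (Int × Int)) (out : Int) : Prop := out = determine_returning_users_tam_alt month user_history durations rest_periods
instance (month : Int) (user_history : List (Int × List (Int × Int))) (durations : List Int) (rest_periods : List (Int × Int)) (out : Int) : Decidable (Spec_determine_returning_users_tam month user_history durations rest_periods out) := by unfold Spec_determine_returning_users_tam; infer_instance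

-- ===== CLAIM (what is proved, stated in full; the proofs are below) =====
def Claim_equal_determine_returning_users_tam : Prop := ∀ (month : Int) (user_history : List (Int × List (Int × Int))) (durations : List Int) (rest_periods : List (Int × Int)), Dom_determine_returning_users_tam month user_history durations rest_periods → Pre_determine_returning_users_tam month user_history durations rest_periods → Spec_determine_returning_users_tam month user_history durations rest_periods (determine_returning_users_tam month user_history durations rest_periods)

-- ===== LEMMAS AND PROOFS =====

-- rest period looked up for a duration, and the unique qualifying join month
def rpD (rest_periods : List (Int × Int)) (d : Int) : Int := (PySem.Dict.mk rest_periods).getD d 1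
def tgt (month : Int) (rest_periods : List (Int × Int)) (d : Int) : Int := month - d - rpD rest_periods d
def fTerm (month : Int) (rest_periods : List (Int × Int)) (jm d c : Int) : Int :=
  if jm + d + rpD rest_periods d = month then c else 0

-- swapping two finite sums
theorem sum_swap {α β : Type} (f : α → β → Int) (xs : List α) (ys : List β) :
    (xs.map (fun x => (ys.map (fun y => f x y)).sum)).sum
      = (ys.map (fun y => (xs.map (fun x => f x y)).sum)).sum := by
  induction xs with
  | nil => simp
  | cons x xs ih => simp [ih]

theorem sum_zero {α : Type} {f : α → Int} {s : List α} (hz : ∀ d ∈ s, f d = 0) :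
    (s.map f).sum = 0 := by
  induction s with
  | nil => simp
  | cons a s ih =>
    simp [hz a List.mem_cons_self, ih (fun d hd => hz d (List.mem_cons_of_mem _ hd))]

theorem sum_single {f : Int → Int} {s : List Int} {x : Int} (hnd : s.Nodup) (hx : x ∈ s)
    (hz : ∀ d ∈ s, d ≠ x → f d = 0) : (s.map f).sum = f x := by
  induction s with
  | nil => cases hx
  | cons a s ih =>
    rcases List.mem_cons.mp hx with h | h
    · subst h
      have hs : (s.map f).sum = 0 := sum_zero (fun d hd =>
        hz d (List.mem_cons_of_mem _ hd) (fun he => (List.nodup_cons.mp hnd).1 (he ▸ hd)))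
      simp [hs]
    · have hax : a ≠ x := fun he => (List.nodup_cons.mp hnd).1 (he ▸ h)
      simp [hz a List.mem_cons_self hax,
        ih (List.nodup_cons.mp hnd).2 h (fun d hd => hz d (List.mem_cons_of_mem _ hd))]

-- A unfolded to a nested sum
theorem A_inner (month : Int) (rest_periods : List (Int × Int)) (jm : Int)
    (l : List (Int × Int)) (acc : Int) :
    l.foldl (fun a q =>
        let rest_period := (PySem.Dict.mk rest_periods).getD q.1 1
        let return_month := jm + q.1 + rest_period
        if return_month = month then a + q.2 else a) acc
      = acc + (l.map (fun q => fTerm month rest_periods jm q.1 q.2)).sum := by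
  induction l generalizing acc with
  | nil => simp
  | cons q l ih =>
    simp only [List.foldl_cons, List.map_cons, List.sum_cons, ih, fTerm, rpD]
    split_ifs <;> ring

theorem A_outer (month : Int) (rp : List (Int × Int)) (uh : List (Int × List (Int × Int)))
    (acc : Int) :
    uh.foldl (fun a p =>
        p.2.foldl (fun a q =>
          let rest_period := (PySem.Dict.mk rp).getD q.1 1
          let return_month := p.1 + q.1 + rest_period
          if return_month = month then a + q.2 else a) a) acc
      = acc + (uh.map (fun p => (p.2.map (fun q => fTerm month rp p.1 q.1 q.2)).sum)).sum := by
  induction uh generalizing acc with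
  | nil => simp
  | cons p uh ih =>
    simp only [List.foldl_cons, List.map_cons, List.sum_cons]
    rw [A_inner, ih]
    ring

theorem A_eq (month : Int) (uh : List (Int × List (Int × Int))) (ds : List Int)
    (rp : List (Int × Int)) :
    determine_returning_users_tam month uh ds rp
      = (uh.map (fun p => (p.2.map (fun q => fTerm month rp p.1 q.1 q.2)).sum)).sum := by
  unfold determine_returning_users_tam
  simpa using A_outer month rp uh 0

theorem B_outer (month : Int) (uh : List (Int × List (Int × Int))) (rp : List (Int × Int))
    (s : List Int) (acc : Int) :
    s.foldl (fun total d =>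
        let join_month := month - d - (PySem.Dict.mk rp).getD d 1
        total + (PySem.Dict.mk ((PySem.Dict.mk uh).getD join_month [])).getD d 0) acc
      = acc + (s.map (fun d =>
          (PySem.Dict.mk ((PySem.Dict.mk uh).getD (tgt month rp d) [])).getD d 0)).sum := by
  induction s generalizing acc with
  | nil => simp
  | cons d s ih =>
    simp only [List.foldl_cons, List.map_cons, List.sum_cons]
    rw [ih]
    simp only [tgt, rpD]
    ring

theorem B_eq (month : Int) (uh : List (Int × List (Int × Int))) (ds : List Int)
    (rp : List (Int × Int)) :
    determine_returning_users_tam_alt month uh ds rp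
      = ((uh.foldl (fun s p => PySem.Set.update s (PySem.Dict.mk p.2).keys) PySem.Set.empty).map
          (fun d => (PySem.Dict.mk ((PySem.Dict.mk uh).getD (tgt month rp d) [])).getD d 0)).sum := by
  unfold determine_returning_users_tam_alt
  simpa using B_outer month uh rp _ 0

-- push an outer condition inside a sum
theorem inner_lookup (d : Int) (l : List (Int × Int)) (hnd : (l.map Prod.fst).Nodup) :
    (PySem.Dict.mk l).getD d 0 = (l.map (fun q => if q.1 = d then q.2 else 0)).sum := by
  induction l with
  | nil => simp [PySem.Dict.getD, PySem.Dict.get?]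
  | cons q l ih =>
    obtain ⟨k, v⟩ := q
    simp only [List.map_cons] at hnd
    rcases List.nodup_cons.mp hnd with ⟨hq, hl⟩
    by_cases h : k = d
    · have hz : (l.map (fun q' : Int × Int => if q'.1 = d then q'.2 else 0)).sum = 0 :=
        sum_zero (fun q' hq' => by
          have hmem : q'.1 ∈ l.map Prod.fst := List.mem_map_of_mem hq'
          simp [show q'.1 ≠ d from fun he => hq (by rw [h, ← he]; exact hmem)])
      simp [PySem.Dict.getD, PySem.Dict.get?_mk_cons, h, hz]
    · simp only [List.map_cons, List.sum_cons, if_neg h, zero_add]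
      rw [← ih hl]
      simp [PySem.Dict.getD, PySem.Dict.get?_mk_cons, h]

-- outer-dict lookup as a sum (needs distinct outer keys)
theorem outer_lookup (d t : Int) (uh : List (Int × List (Int × Int)))
    (hnd : (uh.map Prod.fst).Nodup) :
    (PySem.Dict.mk ((PySem.Dict.mk uh).getD t [])).getD d 0
      = (uh.map (fun p => if p.1 = t then (PySem.Dict.mk p.2).getD d 0 else 0)).sum := by
  induction uh with
  | nil => simp [PySem.Dict.getD, PySem.Dict.get?]
  | cons p uh ih =>
    obtain ⟨k, l⟩ := p
    simp only [List.map_cons] at hnd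
    rcases List.nodup_cons.mp hnd with ⟨hq, hl⟩
    by_cases h : k = t
    · have hz : (uh.map (fun p' : Int × List (Int × Int) =>
          if p'.1 = t then (PySem.Dict.mk p'.2).getD d 0 else 0)).sum = 0 :=
        sum_zero (fun p' hp' => by
          have hmem : p'.1 ∈ uh.map Prod.fst := List.mem_map_of_mem hp'
          simp [show p'.1 ≠ t from fun he => hq (by rw [h, ← he]; exact hmem)])
      simp [PySem.Dict.getD, PySem.Dict.get?_mk_cons, h]
      simpa [PySem.Dict.getD] using hz
    · simp only [List.map_cons, List.sum_cons, if_neg h, zero_add]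
      rw [← ih hl]
      simp [PySem.Dict.getD, PySem.Dict.get?_mk_cons, h]

-- membership / nodup of the duration set B builds
theorem present_mem (uh : List (Int × List (Int × Int))) (s : PySem.Set Int) (d : Int) :
    d ∈ uh.foldl (fun s p => PySem.Set.update s (PySem.Dict.mk p.2).keys) s
      ↔ d ∈ s ∨ ∃ p ∈ uh, ∃ q ∈ p.2, q.1 = d := by
  induction uh generalizing s with
  | nil => simp
  | cons p uh ih =>
    simp only [List.foldl_cons]
    rw [ih]
    simp [PySem.Set.mem_update, List.mem_map]
    tauto

theorem present_nodup (uh : List (Int × List (Int × Int))) (s : PySem.Set Int)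
    (hs : s.Nodup) :
    (uh.foldl (fun s p => PySem.Set.update s (PySem.Dict.mk p.2).keys) s).Nodup := by
  induction uh generalizing s with
  | nil => exact hs
  | cons p uh ih => exact ih _ (PySem.Set.nodup_update _ _ hs)

-- the heart of the proof: rewrite both sides to the same double sum
theorem main_eq (month : Int) (uh : List (Int × List (Int × Int))) (ds : List Int)
    (rp : List (Int × Int)) (hout : (uh.map Prod.fst).Nodup)
    (hin : ∀ p ∈ uh, (p.2.map Prod.fst).Nodup) :
    determine_returning_users_tam month uh ds rp
      = determine_returning_users_tam_alt month uh ds rp := by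
  rw [A_eq, B_eq]
  have hPnd : (uh.foldl (fun s p => PySem.Set.update s (PySem.Dict.mk p.2).keys)
      PySem.Set.empty).Nodup := present_nodup uh _ List.nodup_nil
  have hPmem : ∀ d, d ∈ uh.foldl (fun s p => PySem.Set.update s (PySem.Dict.mk p.2).keys)
      PySem.Set.empty ↔ ∃ p ∈ uh, ∃ q ∈ p.2, q.1 = d := fun d => by
    rw [present_mem]; simp [PySem.Set.empty]
  set P := uh.foldl (fun s p => PySem.Set.update s (PySem.Dict.mk p.2).keys) PySem.Set.empty
    with hP
  -- step 1: each lookup becomes a nested conditional sum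
  have h1 : (P.map (fun d =>
        (PySem.Dict.mk ((PySem.Dict.mk uh).getD (tgt month rp d) [])).getD d 0)).sum
      = (P.map (fun d => (uh.map (fun p =>
          (p.2.map (fun q => if p.1 = tgt month rp d ∧ q.1 = d then q.2 else 0)).sum)).sum)).sum := by
    congr 1
    apply List.map_congr_left
    intro d _
    rw [outer_lookup d _ uh hout]
    congr 1
    apply List.map_congr_left
    intro p hp
    by_cases hc : p.1 = tgt month rp d
    · simp [hc, inner_lookup d p.2 (hin p hp)]
    · rw [if_neg hc, sum_zero]
      intro q _
      exact if_neg (fun hcon => hc hcon.1)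
  rw [h1, sum_swap]
  congr 1
  apply List.map_congr_left
  intro p hp
  rw [sum_swap]
  congr 1
  apply List.map_congr_left
  intro q hq
  rw [sum_single hPnd ((hPmem q.1).mpr ⟨p, hp, q, hq, rfl⟩)
    (fun d _ hne => if_neg (fun hcon => hne hcon.2.symm))]
  have hiff : (p.1 = tgt month rp q.1 ∧ q.1 = q.1) ↔ (p.1 + q.1 + rpD rp q.1 = month) := by
    unfold tgt; omega
  rw [fTerm, if_congr hiff rfl rfl]

-- ===== VERDICT (by name: the statement is the Claim_ definition above) =====
theorem determine_returning_users_tam_spec : Claim_equal_determine_returning_users_tam := by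
  intro month uh ds rp _ hpre
  exact main_eq month uh ds rp hpre.1 hpre.2
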